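-- pv_equiv track=rewrite | github.com/MrBrantCode/unitest_baseline | mut_generate/mist_test_taco/taco_1751/solution.py | minimize_discomfort
-- ===== SOURCE A (Python) =====
-- def minimize_discomfort(n, heights):
--     # Sort the heights to facilitate the arrangement
--     heights.sort()
--
--     # Initialize the result list with -1 to indicate unassigned positions
--     result = [-1] * n
--
--     # Calculate the middle index
--     middle = n // 2
--
--     # Place the largest height in the middle of the result list
--     result[middle] = heights[-1]
--
--     # Initialize indices for placing the remaining heights
--     left = middle - 1
--     right = middle + 1
--     index = n - 2
--
--     # Fill the result list with heights in a way that minimizes discomfort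
--     while left >= 0 and right < n:
--         result[left] = heights[index]
--         index -= 1
--         left -= 1
--
--         if index >= 0:
--             result[right] = heights[index]
--             index -= 1
--             right += 1
--
--     # If there's an odd number of children, the loop above will handle it
--     # If there's an even number of children, we need to place the smallest height at the start
--     if n % 2 == 0:
--         result[0] = heights[0]
--
--     return result
-- ===== SOURCE B (Python) =====
-- def minimize_discomfort(n, heights):
--     # Same mountain arrangement via a closed-form index map (sorts heights in place, like A).
--     heights.sort()
--     mid = n // 2
--     result = []
--     for p in range(n):
--         if p == mid:
--             result.append(heights[-1])
--         else:
--             rank = 2 * (mid - p) - 1 if p < mid else 2 * (p - mid)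
--             result.append(heights[n - 1 - rank])
--     return result
-- ===== Notes on version B (the rewrite author's own statement) =====
-- stated objective: simpler
-- what changed: Replaces the two-pointer while loop with left/right cursors, a shared descending index and the even-n fix-up by a single pass that computes each position's source rank in closed form and reads it directly from the sorted list.
import Mathlib
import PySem

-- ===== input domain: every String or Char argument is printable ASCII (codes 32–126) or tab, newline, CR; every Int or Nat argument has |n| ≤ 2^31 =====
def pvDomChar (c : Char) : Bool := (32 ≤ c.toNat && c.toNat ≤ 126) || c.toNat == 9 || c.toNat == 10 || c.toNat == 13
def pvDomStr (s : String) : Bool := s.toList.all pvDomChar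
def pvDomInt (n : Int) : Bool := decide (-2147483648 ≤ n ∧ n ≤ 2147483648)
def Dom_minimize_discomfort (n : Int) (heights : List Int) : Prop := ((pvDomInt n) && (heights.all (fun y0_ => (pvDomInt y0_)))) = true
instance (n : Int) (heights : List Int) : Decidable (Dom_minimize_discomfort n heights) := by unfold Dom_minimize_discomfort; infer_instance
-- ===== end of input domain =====

-- B replaces A's two-pointer while loop and even-n fix-up by a single closed-form index map
-- over the sorted list (objective: simpler). Both A and B sort `heights` in place in Python;
-- the equivalence proved here is about the return value.

-- ===== PORT A =====
-- the while loop: state (result, left, right, index); fuel n.toNat+1 bounds the ≤ n//2 iterations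
def mdLoop (n : Int) (hs : List Int) : Nat → List Int → Int → Int → Int → List Int
  | 0, result, _, _, _ => result
  | fuel + 1, result, left, right, index =>
    if 0 ≤ left ∧ right < n then
      -- result[left] = heights[index]  (indices nonnegative on Pre_; default never read there)
      let result1 := PySem.List.pySetD result left (PySem.List.pyGetD hs index 0)
      let index1 := index - 1
      let left1 := left - 1
      if 0 ≤ index1 then
        mdLoop n hs fuel (PySem.List.pySetD result1 right (PySem.List.pyGetD hs index1 0)) left1 (right + 1) (index1 - 1)
      else
        mdLoop n hs fuel result1 left1 right index1
    else result

def minimize_discomfort (n : Int) (heights : List Int) : List Int :=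
  let hs := PySem.List.sorted heights (fun x => x) false
  let result := List.replicate n.toNat (-1)        -- [-1] * n
  let middle := PySem.Int.floordiv n 2
  let result := PySem.List.pySetD result middle (PySem.List.pyGetD hs (-1) 0)   -- result[middle] = heights[-1]
  let result := mdLoop n hs (n.toNat + 1) result (middle - 1) (middle + 1) (n - 2)
  if PySem.Int.mod n 2 = 0 then PySem.List.pySetD result 0 (PySem.List.pyGetD hs 0 0) else result

-- ===== PORT B =====
def minimize_discomfort_alt (n : Int) (heights : List Int) : List Int :=
  let hs := PySem.List.sorted heights (fun x => x) false
  let mid := PySem.Int.floordiv n 2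
  (PySem.List.pyRange 0 n 1).map (fun p =>
    if p = mid then PySem.List.pyGetD hs (-1) 0
    else
      let rank : Int := if p < mid then 2 * (mid - p) - 1 else 2 * (p - mid)
      PySem.List.pyGetD hs (n - 1 - rank) 0)

-- ===== PRECONDITION & SPEC =====
-- Pre_ excludes exactly the inputs on which A raises IndexError: n ≤ 0 (A indexes the empty
-- result list to seed the middle) and len(heights) < max(1, n-1) (A's loop reads heights[n-2..0]).
def Pre_minimize_discomfort (n : Int) (heights : List Int) : Prop :=
  1 ≤ n ∧ 1 ≤ (heights.length : Int) ∧ n - 1 ≤ (heights.length : Int)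
instance (n : Int) (heights : List Int) : Decidable (Pre_minimize_discomfort n heights) := by
  unfold Pre_minimize_discomfort; infer_instance

def pvWitness_minimize_discomfort : Int × List Int := (3, [2, 1, 3])

def Spec_minimize_discomfort (n : Int) (heights : List Int) (out : List Int) : Prop := out = minimize_discomfort_alt n heights
instance (n : Int) (heights : List Int) (out : List Int) : Decidable (Spec_minimize_discomfort n heights out) := by unfold Spec_minimize_discomfort; infer_instance

-- ===== CLAIM (what is proved, stated in full; the proofs are below) =====
def Claim_equal_minimize_discomfort : Prop := ∀ (n : Int) (heights : List Int), Dom_minimize_discomfort n heights → Pre_minimize_discomfort n heights → Spec_minimize_discomfort n heights (minimize_discomfort n heights)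

-- ===== LEMMAS AND PROOFS =====

-- the value B places at position p (with m = n // 2): hs[-1] at the middle, else hs[n - 1 - rank p]
def mdTarget (hs : List Int) (n m p : Int) : Int :=
  if p = m then PySem.List.pyGetD hs (-1) 0
  else PySem.List.pyGetD hs (n - 1 - (if p < m then 2 * (m - p) - 1 else 2 * (p - m))) 0

lemma mdTarget_left (hs : List Int) (n m p : Int) (h : p < m) :
    mdTarget hs n m p = PySem.List.pyGetD hs (n - 2 * m + 2 * p) 0 := by
  unfold mdTarget
  rw [if_neg (by omega), if_pos h]
  congr 1
  ring

lemma mdTarget_right (hs : List Int) (n m p : Int) (h : m < p) :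
    mdTarget hs n m p = PySem.List.pyGetD hs (n - 2 * m + 2 * (2 * m - p) - 1) 0 := by
  unfold mdTarget
  rw [if_neg (by omega), if_neg (by omega)]
  congr 1
  ring

-- the loop writes mdTarget at positions 2m-n < p ≤ l (going left) and 2m-l ≤ p < n (going right)
lemma mdLoop_spec (hs : List Int) (n m : Int)
    (hm : n = 2 * m ∨ n = 2 * m + 1) (hm0 : 0 ≤ m) :
    ∀ (fuel : Nat) (l : Int) (result : List Int), (result.length : Int) = n →
      2 * m - n ≤ l → l ≤ m - 1 → (l - (2 * m - n)).toNat ≤ fuel →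
      ∀ (p : Nat),
        (mdLoop n hs fuel result l (2 * m - l) (n - 2 * m + 2 * l))[p]? =
          if (2 * m - n < (p : Int) ∧ (p : Int) ≤ l) ∨ (2 * m - l ≤ (p : Int) ∧ (p : Int) < n) then
            some (mdTarget hs n m p)
          else result[p]? := by
  intro fuel
  induction fuel with
  | zero =>
    intro l result hrl hl1 hl2 hfuel p
    have hl : l = 2 * m - n := by omega
    simp only [mdLoop]
    rw [if_neg (by omega)]
  | succ fuel ih =>
    intro l result hrl hl1 hl2 hfuel p
    by_cases hstop : l = 2 * m - n
    · simp only [mdLoop]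
      rw [if_neg (by omega), if_neg (by omega)]
    · -- one full iteration: 2m-n+1 ≤ l ≤ m-1, so 0 ≤ l and 2m-l < n
      have hl0 : 2 * m - n + 1 ≤ l := by omega
      simp only [mdLoop]
      rw [if_pos (by constructor <;> omega), if_pos (by omega)]
      have harith1 : n - 2 * m + 2 * l - 1 - 1 = n - 2 * m + 2 * (l - 1) := by ring
      have harith2 : 2 * m - l + 1 = 2 * m - (l - 1) := by ring
      rw [harith1, harith2]
      set v1 := PySem.List.pyGetD hs (n - 2 * m + 2 * l) 0 with hv1
      set v2 := PySem.List.pyGetD hs (n - 2 * m + 2 * l - 1) 0 with hv2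
      set result2 := PySem.List.pySetD (PySem.List.pySetD result l v1) (2 * m - l) v2 with hres2
      have hlen2 : (result2.length : Int) = n := by
        simp [hres2, PySem.List.length_pySetD, hrl]
      rw [ih (l - 1) result2 hlen2 (by omega) (by omega) (by omega) p]
      -- unfold the two writes
      have hset : result2 = (result.set l.toNat v1).set (2 * m - l).toNat v2 := by
        rw [hres2, PySem.List.pySetD_of_nonneg _ _ (by omega), PySem.List.pySetD_of_nonneg _ _ (by omega)]
      have hlN : l.toNat < result.length := by omega
      have hrN : (2 * m - l).toNat < (result.set l.toNat v1).length := by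
        rw [List.length_set]; omega
      by_cases hpl : (p : Int) = l
      · -- position written by the first write
        have hc1 : ¬ ((2 * m - n < (p : Int) ∧ (p : Int) ≤ l - 1) ∨ (2 * m - (l - 1) ≤ (p : Int) ∧ (p : Int) < n)) := by omega
        have hc2 : (2 * m - n < (p : Int) ∧ (p : Int) ≤ l) ∨ (2 * m - l ≤ (p : Int) ∧ (p : Int) < n) := by omega
        rw [if_neg hc1, if_pos hc2, hset]
        rw [List.getElem?_set_ne (by omega)]
        rw [mdTarget_left hs n m p (by omega), hpl]
        rw [show p = l.toNat from by omega, List.getElem?_set_self hlN]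
      · by_cases hpr : (p : Int) = 2 * m - l
        · -- position written by the second write
          have hc1 : ¬ ((2 * m - n < (p : Int) ∧ (p : Int) ≤ l - 1) ∨ (2 * m - (l - 1) ≤ (p : Int) ∧ (p : Int) < n)) := by omega
          have hc2 : (2 * m - n < (p : Int) ∧ (p : Int) ≤ l) ∨ (2 * m - l ≤ (p : Int) ∧ (p : Int) < n) := by omega
          rw [if_neg hc1, if_pos hc2, hset]
          rw [mdTarget_right hs n m p (by omega), hpr]
          rw [show p = (2 * m - l).toNat from by omega, List.getElem?_set_self hrN,
            show n - 2 * m + 2 * (2 * m - (2 * m - l)) - 1 = n - 2 * m + 2 * l - 1 from by ring]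
        · -- untouched position: both writes miss p and the two region conditions agree
          rw [hset, List.getElem?_set_ne (by omega), List.getElem?_set_ne (by omega)]
          have hiff : ((2 * m - n < (p : Int) ∧ (p : Int) ≤ l - 1) ∨ (2 * m - (l - 1) ≤ (p : Int) ∧ (p : Int) < n)) ↔
              ((2 * m - n < (p : Int) ∧ (p : Int) ≤ l) ∨ (2 * m - l ≤ (p : Int) ∧ (p : Int) < n)) := by omega
          rw [if_congr hiff rfl rfl]

-- the loop does not change the length of result
lemma mdLoop_length (n : Int) (hs : List Int) :
    ∀ (fuel : Nat) (result : List Int) (l r i : Int),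
      (mdLoop n hs fuel result l r i).length = result.length := by
  intro fuel
  induction fuel with
  | zero => intro result l r i; simp [mdLoop]
  | succ fuel ih =>
    intro result l r i
    simp only [mdLoop]
    split_ifs with h1 h2
    · rw [ih]; simp [PySem.List.length_pySetD]
    · rw [ih]; simp [PySem.List.length_pySetD]
    · rfl

-- ===== VERDICT (by name: the statement is the Claim_ definition above) =====
theorem minimize_discomfort_spec : Claim_equal_minimize_discomfort := by
  intro n heights _hdom hpre
  obtain ⟨hn1, _hL1, _hLn⟩ := hpre
  unfold Spec_minimize_discomfort
  simp only [minimize_discomfort, minimize_discomfort_alt]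
  set hs := PySem.List.sorted heights (fun x => x) false with hhs
  set m := n / 2 with hm
  have hfd : PySem.Int.floordiv n 2 = m := PySem.Int.floordiv_eq_ediv_of_pos (by norm_num)
  have hmcase : n = 2 * m ∨ n = 2 * m + 1 := by omega
  have hm0 : 0 ≤ m := by omega
  have hmn : m < n := by omega
  rw [hfd]
  set result0 := PySem.List.pySetD (List.replicate n.toNat (-1)) m (PySem.List.pyGetD hs (-1) 0) with hres0
  have hlen0 : (result0.length : Int) = n := by
    simp [hres0, PySem.List.length_pySetD]
    omega
  have hres0' : result0 = (List.replicate n.toNat (-1 : Int)).set m.toNat (mdTarget hs n m m) := by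
    rw [hres0, PySem.List.pySetD_of_nonneg _ _ hm0]
    congr 1
    unfold mdTarget
    rw [if_pos rfl]
  -- the loop, entered at l = m-1, r = m+1, i = n-2
  have hr : m + 1 = 2 * m - (m - 1) := by ring
  have hi : n - 2 = n - 2 * m + 2 * (m - 1) := by ring
  rw [hr, hi]
  have hloop := mdLoop_spec hs n m hmcase hm0 (n.toNat + 1) (m - 1) result0 hlen0
    (by omega) (by omega) (by omega)
  have hlooplen : ((mdLoop n hs (n.toNat + 1) result0 (m - 1) (2 * m - (m - 1)) (n - 2 * m + 2 * (m - 1))).length : Int) = n := by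
    rw [mdLoop_length]
    exact hlen0
  -- pointwise comparison of the final lists
  apply List.ext_getElem?
  intro p
  have hB : ∀ (_ : (p : Int) < n),
      ((PySem.List.pyRange 0 n 1).map (fun q =>
        if q = m then PySem.List.pyGetD hs (-1) 0
        else PySem.List.pyGetD hs (n - 1 - (if q < m then 2 * (m - q) - 1 else 2 * (q - m))) 0))[p]? =
      some (mdTarget hs n m p) := by
    intro hp
    rw [show (n : Int) = ((n.toNat : Nat) : Int) from by omega,
      PySem.List.getElem?_map_pyRange_zero _ n.toNat p (by omega)]
    rfl
  have hBnone : ∀ (_ : ¬ (p : Int) < n),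
      ((PySem.List.pyRange 0 n 1).map (fun q =>
        if q = m then PySem.List.pyGetD hs (-1) 0
        else PySem.List.pyGetD hs (n - 1 - (if q < m then 2 * (m - q) - 1 else 2 * (q - m))) 0))[p]? = none := by
    intro hp
    apply List.getElem?_eq_none
    rw [List.length_map, PySem.List.length_pyRange_one]
    omega
  by_cases hp : (p : Int) < n
  · rw [hB hp]
    rcases hmcase with heven | hodd
    · -- n even: the fix-up writes position 0 (= hs[0] = mdTarget 0); here m ≥ 1
      have hmod : PySem.Int.mod n 2 = 0 := by
        rw [PySem.Int.mod_eq_emod_of_pos (by norm_num)]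
        omega
      have hm1 : 1 ≤ m := by omega
      rw [if_pos hmod, PySem.List.pySetD_of_nonneg _ _ le_rfl]
      by_cases hp0 : p = 0
      · rw [show (0 : Int).toNat = p from by omega, List.getElem?_set_self (by omega),
          show ((p : ℕ) : Int) = 0 from by omega, mdTarget_left hs n m 0 (by omega)]
        congr 2
        omega
      · rw [List.getElem?_set_ne (by omega), hloop p]
        by_cases hpm : (p : Int) = m
        · rw [if_neg (by omega), hres0', List.getElem?_set, if_pos (by omega),
            if_pos (by rw [List.length_replicate]; omega)]
          congr 1
          congr 1
          omega
        · rw [if_pos (by omega)]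
    · -- n odd: no fix-up runs
      have hmod : ¬ PySem.Int.mod n 2 = 0 := by
        rw [PySem.Int.mod_eq_emod_of_pos (by norm_num)]
        omega
      rw [if_neg hmod, hloop p]
      by_cases hpm : (p : Int) = m
      · rw [if_neg (by omega), hres0', List.getElem?_set, if_pos (by omega),
          if_pos (by rw [List.length_replicate]; omega)]
        congr 1
        congr 1
        omega
      · rw [if_pos (by omega)]
  · rw [hBnone hp]
    rcases hmcase with heven | hodd
    · have hmod : PySem.Int.mod n 2 = 0 := by
        rw [PySem.Int.mod_eq_emod_of_pos (by norm_num)]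
        omega
      rw [if_pos hmod]
      apply List.getElem?_eq_none
      rw [PySem.List.length_pySetD]
      omega
    · have hmod : ¬ PySem.Int.mod n 2 = 0 := by
        rw [PySem.Int.mod_eq_emod_of_pos (by norm_num)]
        omega
      rw [if_neg hmod]
      apply List.getElem?_eq_none
      omega
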